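-- pv_equiv track=rewrite | github.com/jgravelle/notion-code-mirror | phase1_gather.py | _find_entry_files
-- ===== SOURCE A (Python) =====
-- _ENTRY_BASENAMES = {
--     "main.py", "__main__.py", "server.py", "app.py", "cli.py",
--     "index.py", "run.py", "start.py", "manage.py", "wsgi.py", "asgi.py",
--     "main.ts", "index.ts", "server.ts", "app.ts",
--     "main.js", "index.js", "server.js", "app.js",
--     "main.go", "main.rs", "lib.rs",
-- }
--
-- def _find_entry_files(symbols: list[dict], file_tree: dict) -> list[str]:
--     """Identify likely entry point files from symbol file list."""
--     # Collect unique files preserving centrality order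
--     seen: set[str] = set()
--     all_files: list[str] = []
--     for sym in symbols:
--         f = sym.get("file", "")
--         if f and f not in seen:
--             seen.add(f)
--             all_files.append(f)
--
--     # Prioritize entry-point-named files
--     entry: list[str] = []
--     rest: list[str] = []
--     for f in all_files:
--         basename = f.split("/")[-1].lower()
--         if basename in _ENTRY_BASENAMES:
--             entry.append(f)
--         else:
--             rest.append(f)
--
--     return (entry + rest)[:5]
-- ===== SOURCE B (Python) =====
-- _ENTRY_BASENAMES = {
--     "main.py", "__main__.py", "server.py", "app.py", "cli.py",
--     "index.py", "run.py", "start.py", "manage.py", "wsgi.py", "asgi.py",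
--     "main.ts", "index.ts", "server.ts", "app.ts",
--     "main.js", "index.js", "server.js", "app.js",
--     "main.go", "main.rs", "lib.rs",
-- }
--
-- def _find_entry_files(symbols: list[dict], file_tree: dict) -> list[str]:
--     """Identify likely entry point files from symbol file list."""
--     unique = dict.fromkeys(f for sym in symbols if (f := sym.get("file", "")))
--     return sorted(unique, key=lambda f: f.split("/")[-1].lower() not in _ENTRY_BASENAMES)[:5]
-- ===== Notes on version B (the rewrite author's own statement) =====
-- stated objective: idiomatic
-- what changed: Replaces A's explicit seen-set dedup loop and two-list partition loop by an ordered dedup via dict.fromkeys over the truthy file strings followed by a single stable sort keyed on 'basename not an entry name', then a [:5] slice.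
import Mathlib
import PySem

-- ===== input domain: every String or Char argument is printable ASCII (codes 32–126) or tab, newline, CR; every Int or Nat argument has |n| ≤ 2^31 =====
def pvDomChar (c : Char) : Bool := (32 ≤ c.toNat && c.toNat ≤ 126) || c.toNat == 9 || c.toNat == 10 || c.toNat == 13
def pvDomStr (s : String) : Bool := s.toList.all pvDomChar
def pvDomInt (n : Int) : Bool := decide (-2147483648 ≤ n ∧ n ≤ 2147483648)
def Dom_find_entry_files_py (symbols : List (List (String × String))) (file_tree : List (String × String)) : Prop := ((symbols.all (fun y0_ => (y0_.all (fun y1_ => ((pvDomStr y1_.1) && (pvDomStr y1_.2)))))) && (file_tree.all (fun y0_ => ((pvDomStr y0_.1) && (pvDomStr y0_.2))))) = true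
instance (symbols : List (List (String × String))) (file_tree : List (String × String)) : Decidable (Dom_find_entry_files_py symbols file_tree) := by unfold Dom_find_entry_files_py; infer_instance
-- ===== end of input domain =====

-- B replaces A's set-based dedup loop + two-list partition loop by an ordered dedup
-- (dict.fromkeys) followed by one stable sort keyed on "not an entry basename"
-- (objective: idiomatic; same asymptotic cost is NOT claimed — sort is O(n^2) worst here).

-- shared module constant: the Python set literal _ENTRY_BASENAMES as its distinct elements
def pvEntryBasenames : List String :=
  ["main.py", "__main__.py", "server.py", "app.py", "cli.py",
   "index.py", "run.py", "start.py", "manage.py", "wsgi.py", "asgi.py",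
   "main.ts", "index.ts", "server.ts", "app.ts",
   "main.js", "index.js", "server.js", "app.js",
   "main.go", "main.rs", "lib.rs"]

-- ===== PORT A =====
def find_entry_files_py (symbols : List (List (String × String))) (file_tree : List (String × String)) : List String :=
  -- seen = set(); all_files = []; for sym in symbols: f = sym.get("file", ""); if f and f not in seen: seen.add(f); all_files.append(f)
  let st := symbols.foldl
    (fun (acc : PySem.Set String × List String) sym =>
      if PySem.Dict.getD ⟨sym⟩ "file" "" ≠ "" ∧ PySem.Dict.getD ⟨sym⟩ "file" "" ∉ acc.1
      then (acc.1.add (PySem.Dict.getD ⟨sym⟩ "file" ""), acc.2 ++ [PySem.Dict.getD ⟨sym⟩ "file" ""])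
      else acc)
    (PySem.Set.empty, [])
  -- entry = []; rest = []; for f in all_files: basename = f.split("/")[-1].lower(); append to entry or rest
  let er := st.2.foldl
    (fun (acc : List String × List String) f =>
      if PySem.Str.lower (PySem.List.pyGetD ((PySem.Str.split? f "/").getD []) (-1) "") ∈ pvEntryBasenames
      then (acc.1 ++ [f], acc.2) else (acc.1, acc.2 ++ [f]))
    ([], [])
  -- return (entry + rest)[:5]
  PySem.List.slice (er.1 ++ er.2) none (some 5)

-- ===== PORT B =====
def find_entry_files_py_alt (symbols : List (List (String × String))) (file_tree : List (String × String)) : List String :=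
  -- unique = dict.fromkeys(f for sym in symbols if (f := sym.get("file", "")))
  let unique := PySem.List.dedup
    ((symbols.map (fun sym => PySem.Dict.getD ⟨sym⟩ "file" "")).filter (fun f => decide (f ≠ "")))
  -- sorted(unique, key=lambda f: f.split("/")[-1].lower() not in _ENTRY_BASENAMES)[:5]
  PySem.List.slice
    (PySem.List.sorted unique
      (fun f => decide (PySem.Str.lower (PySem.List.pyGetD ((PySem.Str.split? f "/").getD []) (-1) "") ∉ pvEntryBasenames))
      false)
    none (some 5)

-- ===== PRECONDITION & SPEC =====
def Spec_find_entry_files_py (symbols : List (List (String × String))) (file_tree : List (String × String)) (out : List String) : Prop := out = find_entry_files_py_alt symbols file_tree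
instance (symbols : List (List (String × String))) (file_tree : List (String × String)) (out : List String) : Decidable (Spec_find_entry_files_py symbols file_tree out) := by unfold Spec_find_entry_files_py; infer_instance

-- ===== CLAIM (what is proved, stated in full; the proofs are below) =====
def Claim_equal_find_entry_files_py : Prop := ∀ (symbols : List (List (String × String))) (file_tree : List (String × String)), Dom_find_entry_files_py symbols file_tree → Spec_find_entry_files_py symbols file_tree (find_entry_files_py symbols file_tree)

-- ===== LEMMAS AND PROOFS =====

-- inserting an element that sorts after everything appends it
theorem insertBy_all_false {α : Type} (before : α → α → Bool) (x : α) :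
    ∀ (l : List α), (∀ y ∈ l, before x y = false) → PySem.List.insertBy before x l = l ++ [x] := by
  intro l
  induction l with
  | nil => intro _; rfl
  | cons y ys ih =>
    intro h
    simp [PySem.List.insertBy, h y (by simp)]
    exact ih (fun z hz => h z (by simp [hz]))

-- inserting a false-keyed element into falses ++ trues lands between them
theorem insertBy_bool_mid {α : Type} (k : α → Bool) (x : α) (hx : k x = false) :
    ∀ (F T : List α), (∀ y ∈ F, k y = false) → (∀ y ∈ T, k y = true) →
      PySem.List.insertBy (fun a b => decide (k a < k b)) x (F ++ T) = F ++ x :: T := by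
  intro F
  induction F with
  | nil =>
    intro T _ hT
    cases T with
    | nil => rfl
    | cons t ts =>
      have ht : k t = true := hT t (by simp)
      simp [PySem.List.insertBy, hx, ht]
  | cons f fs ih =>
    intro T hF hT
    have hf : k f = false := hF f (by simp)
    simp [PySem.List.insertBy, hx, hf]
    exact ih T (fun z hz => hF z (by simp [hz])) hT

-- the insertion-sort fold on a boolean key is a stable partition
theorem foldl_insertBy_bool {α : Type} (k : α → Bool) :
    ∀ (xs F T : List α), (∀ y ∈ F, k y = false) → (∀ y ∈ T, k y = true) →
      xs.foldl (fun acc x => PySem.List.insertBy (fun a b => decide (k a < k b)) x acc) (F ++ T)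
        = (F ++ xs.filter (fun x => decide (k x = false))) ++ (T ++ xs.filter (fun x => decide (k x = true))) := by
  intro xs
  induction xs with
  | nil => intro F T _ _; simp
  | cons x xs ih =>
    intro F T hF hT
    by_cases hx : k x = false
    · have step : PySem.List.insertBy (fun a b => decide (k a < k b)) x (F ++ T) = (F ++ [x]) ++ T := by
        rw [insertBy_bool_mid k x hx F T hF hT]; simp
      have hF' : ∀ y ∈ F ++ [x], k y = false := by
        intro y hy
        rw [List.mem_append] at hy
        cases hy with
        | inl h => exact hF y h
        | inr h => simp at h; simpa [h] using hx
      simp only [List.foldl_cons, step]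
      rw [ih (F ++ [x]) T hF' hT]
      simp [hx]
    · have hx' : k x = true := by revert hx; cases k x <;> simp
      have step : PySem.List.insertBy (fun a b => decide (k a < k b)) x (F ++ T) = F ++ (T ++ [x]) := by
        rw [insertBy_all_false _ x (F ++ T) ?_]
        · simp
        · intro y hy
          simp [Bool.lt_iff, hx']
      have hT' : ∀ y ∈ T ++ [x], k y = true := by
        intro y hy
        rw [List.mem_append] at hy
        cases hy with
        | inl h => exact hT y h
        | inr h => simp at h; simpa [h] using hx'
      simp only [List.foldl_cons, step]
      rw [ih F (T ++ [x]) hF hT']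
      simp [hx']

-- sorted over a boolean key is the stable partition: false-keys first, then true-keys
theorem sorted_bool_key {α : Type} (k : α → Bool) (xs : List α) :
    PySem.List.sorted xs k false
      = xs.filter (fun x => decide (k x = false)) ++ xs.filter (fun x => decide (k x = true)) := by
  have h := foldl_insertBy_bool k xs [] [] (by simp) (by simp)
  simpa [PySem.List.sorted] using h

-- sorted with key 'not p' on a decidable predicate p: p-elements first, then the rest
theorem sorted_not_pred_key {α : Type} (p : α → Prop) [DecidablePred p] (xs : List α) :
    PySem.List.sorted xs (fun x => decide (¬ p x)) false
      = xs.filter (fun x => decide (p x)) ++ xs.filter (fun x => decide (¬ p x)) := by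
  rw [sorted_bool_key (fun x => decide (¬ p x)) xs]
  congr 1
  · exact List.filter_congr (by intro x _; by_cases h : p x <;> simp [h])
  · exact List.filter_congr (by intro x _; by_cases h : p x <;> simp [h])

-- A's dedup loop equals folding Set.add over the truthy file strings (second component)
theorem dedup_loop_eq (getF : List (String × String) → String) :
    ∀ (symbols : List (List (String × String))) (s : PySem.Set String) (l : List String),
      (∀ x, x ∈ s ↔ x ∈ l) →
      (symbols.foldl
        (fun (acc : PySem.Set String × List String) sym =>
          if getF sym ≠ "" ∧ getF sym ∉ acc.1
          then (acc.1.add (getF sym), acc.2 ++ [getF sym])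
          else acc)
        (s, l)).2
      = ((symbols.map getF).filter (fun f => decide (f ≠ ""))).foldl PySem.Set.add l := by
  intro symbols
  induction symbols with
  | nil => intro s l _; simp
  | cons sym rest ih =>
    intro s l hinv
    simp only [List.foldl_cons, List.map_cons, List.filter_cons]
    by_cases hf : getF sym = ""
    · simp only [hf, ne_eq, not_true_eq_false, false_and, if_false, decide_false]
      exact ih s l hinv
    · by_cases hmem : getF sym ∈ s
      · have hl : getF sym ∈ l := (hinv _).mp hmem
        have hadd : PySem.Set.add l (getF sym) = l := by
          simp [PySem.Set.add, hl]
        simp only [hmem, not_true_eq_false, and_false, if_false, ne_eq, hf, not_false_eq_true,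
          decide_true, if_true, List.foldl_cons, hadd]
        exact ih s l hinv
      · have hl : getF sym ∉ l := fun h => hmem ((hinv _).mpr h)
        have hadd : PySem.Set.add l (getF sym) = l ++ [getF sym] := by
          simp [PySem.Set.add, hl]
        simp only [ne_eq, hf, not_false_eq_true, hmem, and_true, if_true, decide_true,
          List.foldl_cons, hadd]
        refine ih _ _ ?_
        intro x
        rw [PySem.Set.mem_add]
        simp [hinv x, or_comm]

-- A's partition loop accumulates the two filters
theorem partition_loop_eq (p : String → Prop) [DecidablePred p] :
    ∀ (l : List String) (e r : List String),
      l.foldl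
        (fun (acc : List String × List String) f =>
          if p f then (acc.1 ++ [f], acc.2) else (acc.1, acc.2 ++ [f]))
        (e, r)
      = (e ++ l.filter (fun f => decide (p f)), r ++ l.filter (fun f => decide (¬ p f))) := by
  intro l
  induction l with
  | nil => intro e r; simp
  | cons f fs ih =>
    intro e r
    by_cases hp : p f
    · simp [List.foldl_cons, hp, ih]
    · simp [List.foldl_cons, hp, ih]

-- ===== VERDICT (by name: the statement is the Claim_ definition above) =====
set_option maxHeartbeats 1000000 in
theorem find_entry_files_py_spec : Claim_equal_find_entry_files_py := by
  intro symbols file_tree _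
  unfold Spec_find_entry_files_py find_entry_files_py find_entry_files_py_alt
  have h1 := dedup_loop_eq (fun sym => PySem.Dict.getD ⟨sym⟩ "file" "") symbols
    PySem.Set.empty [] (by intro x; simp [PySem.Set.empty])
  have h2 := sorted_not_pred_key
    (fun f => PySem.Str.lower (PySem.List.pyGetD ((PySem.Str.split? f "/").getD []) (-1) "") ∈ pvEntryBasenames)
    (PySem.List.dedup (((symbols.map (fun sym => PySem.Dict.getD ⟨sym⟩ "file" "")).filter (fun f => decide (f ≠ "")))))
  have h3 := partition_loop_eq
    (fun f => PySem.Str.lower (PySem.List.pyGetD ((PySem.Str.split? f "/").getD []) (-1) "") ∈ pvEntryBasenames)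
    (PySem.List.dedup (((symbols.map (fun sym => PySem.Dict.getD ⟨sym⟩ "file" "")).filter (fun f => decide (f ≠ ""))))) [] []
  have hdedup : List.foldl PySem.Set.add ([] : List String)
      ((symbols.map (fun sym => PySem.Dict.getD ⟨sym⟩ "file" "")).filter (fun f => decide (f ≠ "")))
      = PySem.List.dedup ((symbols.map (fun sym => PySem.Dict.getD ⟨sym⟩ "file" "")).filter (fun f => decide (f ≠ ""))) := by
    rw [PySem.List.dedup_eq_ofList]
    simp [PySem.Set.ofList, PySem.Set.empty]
  simp only [] at h1 h2 h3 ⊢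
  rw [h1, hdedup, h3, h2]
  simp only [List.nil_append]
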